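-- pv_equiv track=rewrite | github.com/Zakrajsk/Racunalnistvo_1 | 8_vaje/kovanci_v_trikotniku.py | optimalna_pot
-- ===== SOURCE A (Python) =====
-- def vsota(trikotnik):
--     '''vrne optimalno pot zapisano v podseznamih'''
--     pot = [[' ' for i in range(j+1)] for j in range(len(trikotnik)-1)]
--     for i in range(len(trikotnik) - 2, -1, -1):
--         for j in range(i+1):
--             trikotnik[i][j] = max(
--                 trikotnik[i][j]+trikotnik[i + 1][j], trikotnik[i][j] + trikotnik[i + 1][j + 1])
--             pot[i][j] = 'levo' if trikotnik[i + 1][j] > trikotnik[i + 1][j + 1] else 'desno'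
--     return pot
--
-- def optimalna_pot(trikotnik):
--     '''vrne opis optimalne poti z nizoma 'levo', 'desno' '''
--     pot = vsota(trikotnik)
--     optimalna_pot = list()
--     j = 0
--     for i in range(len(pot)):
--         if pot[i][j] == 'levo':
--             optimalna_pot.append('levo')
--         if pot[i][j] == 'desno':
--             j += 1
--             optimalna_pot.append('desno')
--     return optimalna_pot
-- ===== SOURCE B (Python) =====
-- def optimalna_pot(trikotnik):
--     '''vrne opis optimalne poti z nizoma 'levo', 'desno' '''
--     # One bottom-up pass carrying (best sum, best path) pairs per cell; the path
--     # itself is built during the DP, so there is no direction grid, no in-place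
--     # mutation and no separate top-down trace. Tie-break: strict '>' picks
--     # 'levo', otherwise 'desno', exactly as the original comparison of the two
--     # finished child sums.
--     n = len(trikotnik)
--     if n <= 1:
--         return []
--     best = [(trikotnik[n - 1][j], []) for j in range(n)]
--     for i in range(n - 2, -1, -1):
--         best = [
--             (trikotnik[i][j] + best[j][0], ['levo'] + best[j][1])
--             if best[j][0] > best[j + 1][0]
--             else (trikotnik[i][j] + best[j + 1][0], ['desno'] + best[j + 1][1])
--             for j in range(i + 1)
--         ]
--     return best[0][1]
-- ===== Notes on version B (the rewrite author's own statement) =====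
-- stated objective: alternative
-- what changed: B replaces A's two-phase scheme (in-place bottom-up DP that also fills a separate 'levo'/'desno' direction grid, followed by a top-down pointer trace over that grid) by a single bottom-up pass over (best sum, best path) pairs: each cell carries its optimal downward path, built during the DP itself, and the answer is read off the apex with no mutation, no direction grid and no trace phase.
import Mathlib
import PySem

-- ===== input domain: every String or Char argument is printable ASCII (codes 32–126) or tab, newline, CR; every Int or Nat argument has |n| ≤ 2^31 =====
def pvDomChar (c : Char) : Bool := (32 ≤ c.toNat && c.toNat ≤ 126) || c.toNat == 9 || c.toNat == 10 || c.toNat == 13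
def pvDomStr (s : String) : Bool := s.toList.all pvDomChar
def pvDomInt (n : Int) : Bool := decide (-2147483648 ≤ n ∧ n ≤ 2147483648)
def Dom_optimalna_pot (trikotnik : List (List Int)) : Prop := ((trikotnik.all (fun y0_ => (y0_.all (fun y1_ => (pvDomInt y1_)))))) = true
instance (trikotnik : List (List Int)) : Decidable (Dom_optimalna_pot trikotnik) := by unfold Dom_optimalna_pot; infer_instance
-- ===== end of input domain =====

-- B replaces A's two-phase scheme (in-place DP + direction grid + top-down pointer trace) by a
-- single bottom-up pass over (best sum, best path) pairs: the path is built during the DP and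
-- read off the apex (objective: alternative). A mutates its argument in place, B does not; the
-- equivalence proved here is about the RETURN value.

-- ===== PORT A =====
-- list indexing trikotnik[i][j] / pot[i][j] is ported with PySem.List.pyGetD / pySetD (exact
-- under Pre_, where every index that Python evaluates is nonnegative and in range)
def optimalna_pot (trikotnik : List (List Int)) : List String :=
  -- helper vsota, inlined literally: builds the grid `pot` of 'levo'/'desno' while doing the DP
  let vs :=
    let n := trikotnik.length
    let pot : List (List String) :=
      (PySem.List.pyRange 0 ((n : Int) - 1) 1).map
        (fun j => (PySem.List.pyRange 0 (j + 1) 1).map (fun _ => " "))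
    (PySem.List.pyRange ((n : Int) - 2) (-1) (-1)).foldl
      (fun (st : List (List Int) × List (List String)) i =>
        (PySem.List.pyRange 0 (i + 1) 1).foldl
          (fun (st : List (List Int) × List (List String)) j =>
            let t := st.1
            let v := max
              (PySem.List.pyGetD (PySem.List.pyGetD t i []) j 0 +
                PySem.List.pyGetD (PySem.List.pyGetD t (i + 1) []) j 0)
              (PySem.List.pyGetD (PySem.List.pyGetD t i []) j 0 +
                PySem.List.pyGetD (PySem.List.pyGetD t (i + 1) []) (j + 1) 0)
            let t' := PySem.List.pySetD t i (PySem.List.pySetD (PySem.List.pyGetD t i []) j v)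
            let d := if PySem.List.pyGetD (PySem.List.pyGetD t' (i + 1) []) j 0 >
                        PySem.List.pyGetD (PySem.List.pyGetD t' (i + 1) []) (j + 1) 0
                     then "levo" else "desno"
            (t', PySem.List.pySetD st.2 i (PySem.List.pySetD (PySem.List.pyGetD st.2 i []) j d)))
          st)
      (trikotnik, pot)
  let pot := vs.2
  ((PySem.List.pyRange 0 ((pot.length : Int)) 1).foldl
    (fun (st : List String × Int) i =>
      let st1 := if PySem.List.pyGetD (PySem.List.pyGetD pot i []) st.2 "" == "levo"
                 then (st.1 ++ ["levo"], st.2) else st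
      if PySem.List.pyGetD (PySem.List.pyGetD pot i []) st1.2 "" == "desno"
      then (st1.1 ++ ["desno"], st1.2 + 1) else st1)
    ([], 0)).1

-- ===== PORT B =====
def optimalna_pot_alt (trikotnik : List (List Int)) : List String :=
  let n := trikotnik.length
  if n ≤ 1 then []
  else
    let best0 : List (Int × List String) :=
      (PySem.List.pyRange 0 ((n : Int)) 1).map
        (fun j => (PySem.List.pyGetD (PySem.List.pyGetD trikotnik ((n : Int) - 1) []) j 0,
                   ([] : List String)))
    let bestf :=
      (PySem.List.pyRange ((n : Int) - 2) (-1) (-1)).foldl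
        (fun (best : List (Int × List String)) i =>
          (PySem.List.pyRange 0 (i + 1) 1).map
            (fun j =>
              if (PySem.List.pyGetD best j (0, [])).1 >
                 (PySem.List.pyGetD best (j + 1) (0, [])).1
              then (PySem.List.pyGetD (PySem.List.pyGetD trikotnik i []) j 0 +
                      (PySem.List.pyGetD best j (0, [])).1,
                    "levo" :: (PySem.List.pyGetD best j (0, [])).2)
              else (PySem.List.pyGetD (PySem.List.pyGetD trikotnik i []) j 0 +
                      (PySem.List.pyGetD best (j + 1) (0, [])).1,
                    "desno" :: (PySem.List.pyGetD best (j + 1) (0, [])).2)))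
        best0
    (PySem.List.pyGetD bestf 0 (0, [])).2

-- ===== PRECONDITION & SPEC =====
-- Pre_ excludes exactly the inputs on which the Python A raises IndexError: with at least two
-- rows, every row i must have at least i+1 entries (the loops read row i at columns 0..i and the
-- last row one column further).
def Pre_optimalna_pot (trikotnik : List (List Int)) : Prop :=
  trikotnik.length ≤ 1 ∨ ∀ i < trikotnik.length, i + 1 ≤ (trikotnik.getD i []).length
instance (trikotnik : List (List Int)) : Decidable (Pre_optimalna_pot trikotnik) := by
  unfold Pre_optimalna_pot; infer_instance
def pvWitness_optimalna_pot : List (List Int) := [[3], [1, 2], [4, 5, 6]]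
def Spec_optimalna_pot (trikotnik : List (List Int)) (out : List String) : Prop := out = optimalna_pot_alt trikotnik
instance (trikotnik : List (List Int)) (out : List String) : Decidable (Spec_optimalna_pot trikotnik out) := by unfold Spec_optimalna_pot; infer_instance

-- ===== CLAIM (what is proved, stated in full; the proofs are below) =====
def Claim_equal_optimalna_pot : Prop := ∀ (trikotnik : List (List Int)), Dom_optimalna_pot trikotnik → Pre_optimalna_pot trikotnik → Spec_optimalna_pot trikotnik (optimalna_pot trikotnik)

-- ===== LEMMAS AND PROOFS =====

-- abstract (Nat-indexed) forms of A's loops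
def pvUpd (t : List (List Int)) (i j : Nat) : List (List Int) :=
  t.set i ((t.getD i []).set j
    ((t.getD i []).getD j 0 +
      max ((t.getD (i + 1) []).getD j 0) ((t.getD (i + 1) []).getD (j + 1) 0)))

def pvInn (t : List (List Int)) (i : Nat) : List (List Int) :=
  (List.range (i + 1)).foldl (fun t j => pvUpd t i j) t

def pvFoldDown {α : Type} (f : α → Nat → α) : Nat → α → α
  | 0, s => s
  | k + 1, s => pvFoldDown f k (f s k)

def pvDir (nr : List Int) (j : Nat) : String :=
  if nr.getD (j + 1) 0 < nr.getD j 0 then "levo" else "desno"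

def pvStepA (st : List (List Int) × List (List String)) (i j : Nat) :
    List (List Int) × List (List String) :=
  let t := st.1
  let v := max ((t.getD i []).getD j 0 + (t.getD (i + 1) []).getD j 0)
               ((t.getD i []).getD j 0 + (t.getD (i + 1) []).getD (j + 1) 0)
  let t' := t.set i ((t.getD i []).set j v)
  (t', st.2.set i ((st.2.getD i []).set j (pvDir (t'.getD (i + 1) []) j)))

def pvInnA (st : List (List Int) × List (List String)) (i : Nat) :
    List (List Int) × List (List String) :=
  (List.range (i + 1)).foldl (fun st j => pvStepA st i j) st


-- descending outer loop: range(n-2, -1, -1)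
theorem pvFoldDesc_aux {α : Type} (f : α → Int → α) (k : Nat) :
    ∀ s, (PySem.List.pyRange ((k : Int) - 1) (-1) (-1)).foldl f s
      = pvFoldDown (fun s (m : Nat) => f s (m : Int)) k s := by
  induction k with
  | zero => intro s; rw [PySem.List.pyRange_neg_one_eq_nil (by norm_num)]; rfl
  | succ k ih =>
    intro s
    have h1 : ((k + 1 : Nat) : Int) - 1 = (k : Int) := by push_cast; ring
    rw [h1, PySem.List.pyRange_neg_one_cons (by omega), List.foldl_cons]
    have h2 : (k : Int) - 1 = ((k : Nat) : Int) - 1 := by norm_num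
    rw [h2, ih]
    rfl

theorem pvFoldDesc {α : Type} (f : α → Int → α) (n : Nat) (s : α) :
    (PySem.List.pyRange ((n : Int) - 2) (-1) (-1)).foldl f s
      = pvFoldDown (fun s (m : Nat) => f s (m : Int)) (n - 1) s := by
  cases n with
  | zero => rw [PySem.List.pyRange_neg_one_eq_nil (by norm_num)]; rfl
  | succ m =>
    have h1 : ((m + 1 : Nat) : Int) - 2 = ((m : Nat) : Int) - 1 := by push_cast; ring
    rw [h1, pvFoldDesc_aux]
    rfl

theorem pvFoldUp {α : Type} (f : α → Int → α) (b : Int) (s : α) :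
    (PySem.List.pyRange 0 b 1).foldl f s
      = (List.range b.toNat).foldl (fun s (m : Nat) => f s (m : Int)) s := by
  rw [PySem.List.pyRange_one, List.foldl_map]
  simp only [zero_add, sub_zero]

theorem pvMapUp {α : Type} (f : Int → α) (b : Int) :
    (PySem.List.pyRange 0 b 1).map f = (List.range b.toNat).map (fun (m : Nat) => f (m : Int)) := by
  rw [PySem.List.pyRange_one, List.map_map]
  simp only [Function.comp_def, zero_add, sub_zero]

-- generic getD-of-set facts
theorem getD_set_ne {α : Type} (l : List (List α)) (i r : Nat) (x : List α) (h : i ≠ r) :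
    (l.set i x).getD r [] = l.getD r [] := by
  simp [List.getD_eq_getElem?_getD, List.getElem?_set_ne h]

theorem getD_set_getD {α : Type} (l : List (List α)) (i j : Nat) (v : α) :
    (l.set i ((l.getD i []).set j v)).getD i [] = (l.getD i []).set j v := by
  by_cases h : i < l.length
  · simp [List.getD_eq_getElem?_getD, h]
  · rw [List.set_eq_of_length_le (by omega)]
    simp [List.getD_eq_getElem?_getD, List.getElem?_eq_none (by omega : l.length ≤ i)]

theorem getD_set_ne' {α : Type} (l : List α) (i r : Nat) (x d : α) (h : i ≠ r) :
    (l.set i x).getD r d = l.getD r d := by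
  simp [List.getD_eq_getElem?_getD, List.getElem?_set_ne h]

theorem getD_set_self' {α : Type} (l : List α) (i : Nat) (x d : α) (h : i < l.length) :
    (l.set i x).getD i d = x := by
  simp [List.getD_eq_getElem?_getD, h]

-- pvStepA is pvUpd on the first component
theorem pvStepA_fst (st : List (List Int) × List (List String)) (i j : Nat) :
    (pvStepA st i j).1 = pvUpd st.1 i j := by
  simp [pvStepA, pvUpd, Int.max_add_left]

-- frame: pvUpd touches only row i
theorem row_pvUpd_ne (t : List (List Int)) (i j r : Nat) (h : r ≠ i) :
    (pvUpd t i j).getD r [] = t.getD r [] := by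
  unfold pvUpd; exact getD_set_ne _ _ _ _ (by omega)

theorem row_foldUpd_ne (js : List Nat) (i r : Nat) (h : r ≠ i) :
    ∀ t, ((js.foldl (fun t j => pvUpd t i j) t).getD r []) = t.getD r [] := by
  induction js with
  | nil => intro t; rfl
  | cons j js ih => intro t; rw [List.foldl_cons, ih, row_pvUpd_ne _ _ _ _ h]

theorem row_pvInn_ne (t : List (List Int)) (i r : Nat) (h : r ≠ i) :
    (pvInn t i).getD r [] = t.getD r [] := row_foldUpd_ne _ _ _ h t

theorem row_pvFoldDown_ge (k : Nat) :
    ∀ (t : List (List Int)) (r : Nat), k ≤ r →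
      (pvFoldDown pvInn k t).getD r [] = t.getD r [] := by
  induction k with
  | zero => intro t r _; rfl
  | succ k ih =>
    intro t r hr
    show (pvFoldDown pvInn k (pvInn t k)).getD r [] = t.getD r []
    rw [ih _ _ (by omega), row_pvInn_ne _ _ _ (by omega)]

-- inner loop characterization: fst is the pot-free DP inner loop; pot row i gets the directions
-- read from the (unchanged) row i+1; other pot rows are untouched
theorem innA_spec (i : Nat) (c : Nat) : ∀ t p,
    ((List.range c).foldl (fun st j => pvStepA st i j) (t, p)).1
      = (List.range c).foldl (fun t j => pvUpd t i j) t
  ∧ (∀ r, r ≠ i → ((List.range c).foldl (fun st j => pvStepA st i j) (t, p)).2.getD r [] = p.getD r [])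
  ∧ ((List.range c).foldl (fun st j => pvStepA st i j) (t, p)).2.getD i []
      = (List.range c).foldl (fun r j => r.set j (pvDir (t.getD (i + 1) []) j)) (p.getD i []) := by
  induction c with
  | zero => intro t p; exact ⟨rfl, fun _ _ => rfl, rfl⟩
  | succ c ih =>
    intro t p
    obtain ⟨ih1, ih2, ih3⟩ := ih t p
    set stc := (List.range c).foldl (fun st j => pvStepA st i j) (t, p) with hstc
    have hne : ∀ X, (stc.1.set i X).getD (i + 1) [] = t.getD (i + 1) [] := by
      intro X
      rw [getD_set_ne _ _ _ _ (by omega), ih1, row_foldUpd_ne _ _ _ (by omega)]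
    have hstep : pvStepA stc i c
        = (pvUpd stc.1 i c,
           stc.2.set i ((stc.2.getD i []).set c (pvDir (t.getD (i + 1) []) c))) := by
      refine Prod.ext ?_ ?_
      · rw [pvStepA_fst]
      · simp only [pvStepA]
        rw [hne]
    rw [List.range_succ]
    simp only [List.foldl_append, List.foldl_cons, List.foldl_nil, ← hstc, hstep]
    refine ⟨by rw [ih1], ?_, ?_⟩
    · intro r hr
      rw [getD_set_ne _ _ _ _ (by omega), ih2 r hr]
    · rw [getD_set_getD, ih3]

theorem pvInnA_fst (st : List (List Int) × List (List String)) (i : Nat) :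
    (pvInnA st i).1 = pvInn st.1 i :=
  (innA_spec i (i + 1) st.1 st.2).1

theorem pvInnA_pair (st : List (List Int) × List (List String)) (i : Nat) :
    pvInnA st i = (pvInn st.1 i, (pvInnA st i).2) :=
  Prod.ext (pvInnA_fst st i) rfl

theorem pvInnA_snd_ne (t : List (List Int)) (p : List (List String)) (i r : Nat) (h : r ≠ i) :
    (pvInnA (t, p) i).2.getD r [] = p.getD r [] :=
  (innA_spec i (i + 1) t p).2.1 r h

theorem pvInnA_snd_self (t : List (List Int)) (p : List (List String)) (i : Nat) :
    (pvInnA (t, p) i).2.getD i []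
      = (List.range (i + 1)).foldl (fun r j => r.set j (pvDir (t.getD (i + 1) []) j)) (p.getD i []) :=
  (innA_spec i (i + 1) t p).2.2

theorem foldA_snd (k : Nat) : ∀ t p,
    (∀ r, k ≤ r → (pvFoldDown pvInnA k (t, p)).2.getD r [] = p.getD r [])
  ∧ (∀ m, m < k → (pvFoldDown pvInnA k (t, p)).2.getD m []
      = (List.range (m + 1)).foldl
          (fun r j => r.set j (pvDir ((pvFoldDown pvInn k t).getD (m + 1) []) j))
          (p.getD m [])) := by
  induction k with
  | zero => intro t p; exact ⟨fun _ _ => rfl, fun m hm => absurd hm (by omega)⟩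
  | succ k ih =>
    intro t p
    have hpair : pvFoldDown pvInnA (k + 1) (t, p)
        = pvFoldDown pvInnA k (pvInn t k, (pvInnA (t, p) k).2) := by
      show pvFoldDown pvInnA k (pvInnA (t, p) k) = _
      rw [pvInnA_pair]
    obtain ⟨iha, ihb⟩ := ih (pvInn t k) (pvInnA (t, p) k).2
    constructor
    · intro r hr
      rw [hpair, iha r (by omega), pvInnA_snd_ne t p k r (by omega)]
    · intro m hm
      by_cases hmk : m = k
      · subst hmk
        have hfin : (pvFoldDown pvInn (m + 1) t).getD (m + 1) [] = t.getD (m + 1) [] :=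
          row_pvFoldDown_ge (m + 1) t (m + 1) (le_refl _)
        rw [hpair, iha m (le_refl m), pvInnA_snd_self, hfin]
      · rw [hpair, ihb m (by omega), pvInnA_snd_ne t p k m hmk]
        rfl

-- writing directions into a fresh row of blanks fills it completely
theorem set_cons_append_length {α : Type} (xs : List α) (y : α) (ys : List α) (a : α) (n : Nat)
    (h : n = xs.length) : (xs ++ y :: ys).set n a = xs ++ a :: ys := by
  subst h; simp

theorem foldl_set_range {α : Type} (f : Nat → α) :
    ∀ (c : Nat) (r0 : List α), c ≤ r0.length →
      (List.range c).foldl (fun r j => r.set j (f j)) r0 = (List.range c).map f ++ r0.drop c := by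
  intro c
  induction c with
  | zero => intro r0 _; simp
  | succ c ih =>
    intro r0 hc
    rw [List.range_succ]
    simp only [List.foldl_append, List.foldl_cons, List.foldl_nil]
    rw [ih r0 (by omega), List.drop_eq_getElem_cons (by omega : c < r0.length),
      set_cons_append_length _ _ _ _ c (by simp), List.map_append]
    simp

theorem foldl_stepA_len (js : List Nat) (i : Nat) :
    ∀ st : List (List Int) × List (List String),
      (js.foldl (fun st j => pvStepA st i j) st).2.length = st.2.length := by
  induction js with
  | nil => intro st; rfl
  | cons j js ih => intro st; rw [List.foldl_cons, ih]; simp [pvStepA]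

theorem foldA_snd_len (k : Nat) :
    ∀ st : List (List Int) × List (List String),
      (pvFoldDown pvInnA k st).2.length = st.2.length := by
  induction k with
  | zero => intro st; rfl
  | succ k ih =>
    intro st
    show (pvFoldDown pvInnA k (pvInnA st k)).2.length = st.2.length
    rw [ih]
    exact foldl_stepA_len _ _ st

def pvPot0 (n : Nat) : List (List String) :=
  (List.range (n - 1)).map (fun m => List.replicate (m + 1) " ")

theorem pvPot0_len (n : Nat) : (pvPot0 n).length = n - 1 := by simp [pvPot0]

theorem pvPot0_row (n m : Nat) (h : m < n - 1) :
    (pvPot0 n).getD m [] = List.replicate (m + 1) " " := by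
  rw [pvPot0, List.getD_eq_getElem?_getD, List.getElem?_map, List.getElem?_range h]
  rfl

-- final pot grid: row i lists the comparisons of the two children in the FINISHED row i+1
theorem potf_row (trik : List (List Int)) (i : Nat) (h : i < trik.length - 1) :
    (pvFoldDown pvInnA (trik.length - 1) (trik, pvPot0 trik.length)).2.getD i []
      = (List.range (i + 1)).map
          (fun j => pvDir ((pvFoldDown pvInn (trik.length - 1) trik).getD (i + 1) []) j) := by
  rw [(foldA_snd (trik.length - 1) trik (pvPot0 trik.length)).2 i h, pvPot0_row _ _ h,
    foldl_set_range _ (i + 1) _ (by simp)]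
  simp

def pvTraceA (potf : List (List String)) (m : Nat) : List String × Int :=
  (List.range m).foldl
    (fun st i =>
      let st1 := if PySem.List.pyGetD (potf.getD i []) st.2 "" == "levo"
                 then (st.1 ++ ["levo"], st.2) else st
      if PySem.List.pyGetD (potf.getD i []) st1.2 "" == "desno"
      then (st1.1 ++ ["desno"], st1.2 + 1) else st1)
    ([], 0)

def pvTraceB (dpf : List (List Int)) (m : Nat) : List String × Int :=
  (List.range m).foldl
    (fun st i =>
      if PySem.List.pyGetD (dpf.getD (i + 1) []) st.2 0 >
         PySem.List.pyGetD (dpf.getD (i + 1) []) (st.2 + 1) 0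
      then (st.1 ++ ["levo"], st.2)
      else (st.1 ++ ["desno"], st.2 + 1))
    ([], 0)

theorem pvTraceA_succ (potf : List (List String)) (m : Nat) :
    pvTraceA potf (m + 1) =
      (if PySem.List.pyGetD (potf.getD m [])
            (if PySem.List.pyGetD (potf.getD m []) (pvTraceA potf m).2 "" == "levo"
             then ((pvTraceA potf m).1 ++ ["levo"], (pvTraceA potf m).2)
             else pvTraceA potf m).2 "" == "desno"
       then ((if PySem.List.pyGetD (potf.getD m []) (pvTraceA potf m).2 "" == "levo"
              then ((pvTraceA potf m).1 ++ ["levo"], (pvTraceA potf m).2)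
              else pvTraceA potf m).1 ++ ["desno"],
             (if PySem.List.pyGetD (potf.getD m []) (pvTraceA potf m).2 "" == "levo"
              then ((pvTraceA potf m).1 ++ ["levo"], (pvTraceA potf m).2)
              else pvTraceA potf m).2 + 1)
       else (if PySem.List.pyGetD (potf.getD m []) (pvTraceA potf m).2 "" == "levo"
             then ((pvTraceA potf m).1 ++ ["levo"], (pvTraceA potf m).2)
             else pvTraceA potf m)) := by
  rw [pvTraceA, List.range_succ]
  simp only [List.foldl_append, List.foldl_cons, List.foldl_nil]
  rfl

theorem pvTraceB_succ (dpf : List (List Int)) (m : Nat) :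
    pvTraceB dpf (m + 1) =
      (if PySem.List.pyGetD (dpf.getD (m + 1) []) (pvTraceB dpf m).2 0 >
          PySem.List.pyGetD (dpf.getD (m + 1) []) ((pvTraceB dpf m).2 + 1) 0
       then ((pvTraceB dpf m).1 ++ ["levo"], (pvTraceB dpf m).2)
       else ((pvTraceB dpf m).1 ++ ["desno"], (pvTraceB dpf m).2 + 1)) := by
  rw [pvTraceB, List.range_succ]
  simp only [List.foldl_append, List.foldl_cons, List.foldl_nil]
  rfl

theorem trace_eq (dpf : List (List Int)) (potf : List (List String)) (N : Nat)
    (hrow : ∀ i < N, potf.getD i []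
      = (List.range (i + 1)).map (fun j => pvDir (dpf.getD (i + 1) []) j)) :
    ∀ m ≤ N, pvTraceA potf m = pvTraceB dpf m
      ∧ 0 ≤ (pvTraceB dpf m).2 ∧ (pvTraceB dpf m).2 ≤ (m : Int) := by
  intro m
  induction m with
  | zero => intro _; exact ⟨rfl, by simp [pvTraceB], by simp [pvTraceB]⟩
  | succ m ih =>
    intro hm
    obtain ⟨hab, hj0, hjm⟩ := ih (by omega)
    rw [pvTraceA_succ, pvTraceB_succ, hab]
    set st := pvTraceB dpf m with hst
    obtain ⟨k, hk⟩ : ∃ k : Nat, st.2 = (k : Int) := ⟨st.2.toNat, by omega⟩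
    have hklt : k < m + 1 := by omega
    have hone : (k : Int) + 1 = ((k + 1 : Nat) : Int) := by push_cast; ring
    have hentry : PySem.List.pyGetD
        ((List.range (m + 1)).map (fun j => pvDir (dpf.getD (m + 1) []) j)) ((k : Nat) : Int) ""
        = pvDir (dpf.getD (m + 1) []) k := by
      rw [PySem.List.pyGetD_natCast, List.getD_eq_getElem?_getD, List.getElem?_map,
        List.getElem?_range hklt]
      rfl
    have hBl : PySem.List.pyGetD (dpf.getD (m + 1) []) ((k : Nat) : Int) 0
        = (dpf.getD (m + 1) []).getD k 0 := PySem.List.pyGetD_natCast _ _ _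
    have hBr : PySem.List.pyGetD (dpf.getD (m + 1) []) ((k : Int) + 1) 0
        = (dpf.getD (m + 1) []).getD (k + 1) 0 := by
      rw [hone, PySem.List.pyGetD_natCast]
    rw [hrow m (by omega), hk]
    have haux1 : (("levo" : String) == "levo") = true := rfl
    have haux2 : (("levo" : String) == "desno") = false := rfl
    have haux3 : (("desno" : String) == "levo") = false := rfl
    have haux4 : (("desno" : String) == "desno") = true := rfl
    by_cases hcmp : (dpf.getD (m + 1) []).getD (k + 1) 0 < (dpf.getD (m + 1) []).getD k 0
    · have hdir : pvDir (dpf.getD (m + 1) []) k = "levo" := by rw [pvDir, if_pos hcmp]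
      simp only [hentry, hdir, haux1, haux2, Bool.false_eq_true, if_true, if_false,
        hBl, hBr, gt_iff_lt, if_pos hcmp]
      exact ⟨trivial, by omega, by push_cast; omega⟩
    · have hdir : pvDir (dpf.getD (m + 1) []) k = "desno" := by rw [pvDir, if_neg hcmp]
      simp only [hentry, hdir, haux3, haux4, Bool.false_eq_true, if_true, if_false, hk,
        hBl, hBr, gt_iff_lt, if_neg hcmp]
      exact ⟨trivial, by omega, by push_cast; omega⟩

theorem pvFoldDown_congr {α : Type} (f g : α → Nat → α) (h : ∀ s m, f s m = g s m) :
    ∀ (k : Nat) (s : α), pvFoldDown f k s = pvFoldDown g k s := by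
  intro k
  induction k with
  | zero => intro s; rfl
  | succ k ih => intro s; show pvFoldDown f k (f s k) = pvFoldDown g k (g s k); rw [h, ih]

theorem pot0_norm (n : Nat) :
    (PySem.List.pyRange 0 ((n : Int) - 1) 1).map
        (fun j => (PySem.List.pyRange 0 (j + 1) 1).map (fun _ => " "))
      = pvPot0 n := by
  rw [pvMapUp, show ((n : Int) - 1).toNat = n - 1 by omega, pvPot0]
  refine List.map_congr_left ?_
  intro m _
  rw [show ((m : Nat) : Int) + 1 = ((m + 1 : Nat) : Int) by push_cast; ring, pvMapUp,
    show (((m + 1 : Nat) : Int)).toNat = m + 1 by omega]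
  simp

theorem afold_norm (trik : List (List Int)) (pot : List (List String)) :
    (PySem.List.pyRange ((trik.length : Int) - 2) (-1) (-1)).foldl
      (fun (st : List (List Int) × List (List String)) i =>
        (PySem.List.pyRange 0 (i + 1) 1).foldl
          (fun (st : List (List Int) × List (List String)) j =>
            let t := st.1
            let v := max
              (PySem.List.pyGetD (PySem.List.pyGetD t i []) j 0 +
                PySem.List.pyGetD (PySem.List.pyGetD t (i + 1) []) j 0)
              (PySem.List.pyGetD (PySem.List.pyGetD t i []) j 0 +
                PySem.List.pyGetD (PySem.List.pyGetD t (i + 1) []) (j + 1) 0)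
            let t' := PySem.List.pySetD t i (PySem.List.pySetD (PySem.List.pyGetD t i []) j v)
            let d := if PySem.List.pyGetD (PySem.List.pyGetD t' (i + 1) []) j 0 >
                        PySem.List.pyGetD (PySem.List.pyGetD t' (i + 1) []) (j + 1) 0
                     then "levo" else "desno"
            (t', PySem.List.pySetD st.2 i (PySem.List.pySetD (PySem.List.pyGetD st.2 i []) j d)))
          st)
      (trik, pot)
    = pvFoldDown pvInnA (trik.length - 1) (trik, pot) := by
  rw [pvFoldDesc]
  refine pvFoldDown_congr _ _ ?_ _ _
  intro st m
  rw [pvFoldUp, show (((m : Nat) : Int) + 1).toNat = m + 1 by omega, pvInnA]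
  congr 1
  funext st' j
  simp only [← Nat.cast_add_one, PySem.List.pyGetD_natCast, PySem.List.pySetD_natCast,
    pvStepA, pvDir, gt_iff_lt]

theorem trace_norm (pot : List (List String)) :
    (PySem.List.pyRange 0 ((pot.length : Int)) 1).foldl
      (fun (st : List String × Int) i =>
        let st1 := if PySem.List.pyGetD (PySem.List.pyGetD pot i []) st.2 "" == "levo"
                   then (st.1 ++ ["levo"], st.2) else st
        if PySem.List.pyGetD (PySem.List.pyGetD pot i []) st1.2 "" == "desno"
        then (st1.1 ++ ["desno"], st1.2 + 1) else st1)
      ([], 0)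
    = pvTraceA pot pot.length := by
  rw [pvFoldUp, show ((pot.length : Int)).toNat = pot.length by omega, pvTraceA]
  congr 1
  funext st i
  simp only [PySem.List.pyGetD_natCast]

theorem portA_norm (trik : List (List Int)) :
    optimalna_pot trik
      = (pvTraceA ((pvFoldDown pvInnA (trik.length - 1) (trik, pvPot0 trik.length)).2)
          ((pvFoldDown pvInnA (trik.length - 1) (trik, pvPot0 trik.length)).2.length)).1 := by
  simp only [optimalna_pot]
  rw [afold_norm, pot0_norm, trace_norm]

-- A's return value, normalized to the path-pointer trace over the finished DP table
theorem portA_traceB (trik : List (List Int)) :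
    optimalna_pot trik
      = (pvTraceB (pvFoldDown pvInn (trik.length - 1) trik) (trik.length - 1)).1 := by
  rw [portA_norm]
  have hlen : (pvFoldDown pvInnA (trik.length - 1) (trik, pvPot0 trik.length)).2.length
      = trik.length - 1 := by
    rw [foldA_snd_len]; exact pvPot0_len _
  rw [hlen]
  exact congrArg Prod.fst
    ((trace_eq (pvFoldDown pvInn (trik.length - 1) trik) _ (trik.length - 1)
      (potf_row trik) (trik.length - 1) (le_refl _)).1)

-- ===== B-side: recursive path characterization =====

-- the optimal path read downward from a position, given the finished DP rows strictly below it
def pvPath : List (List Int) → Nat → List String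
  | [], _ => []
  | r :: rest, j =>
      if r.getD (j + 1) 0 < r.getD j 0 then "levo" :: pvPath rest j
      else "desno" :: pvPath rest (j + 1)

def pvPathJ : List (List Int) → Nat → Nat
  | [], j => j
  | r :: rest, j =>
      if r.getD (j + 1) 0 < r.getD j 0 then pvPathJ rest j else pvPathJ rest (j + 1)

-- A's trace over a list of rows IS pvPath
theorem traceRows_path (rs : List (List Int)) :
    ∀ (acc : List String) (j : Nat),
      rs.foldl
        (fun (st : List String × Int) r =>
          if PySem.List.pyGetD r st.2 0 > PySem.List.pyGetD r (st.2 + 1) 0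
          then (st.1 ++ ["levo"], st.2)
          else (st.1 ++ ["desno"], st.2 + 1))
        (acc, (j : Int))
      = (acc ++ pvPath rs j, ((pvPathJ rs j : Nat) : Int)) := by
  induction rs with
  | nil => intro acc j; simp [pvPath, pvPathJ]
  | cons r rest ih =>
    intro acc j
    rw [List.foldl_cons]
    have h1 : PySem.List.pyGetD r ((j : Nat) : Int) 0 = r.getD j 0 :=
      PySem.List.pyGetD_natCast _ _ _
    have h2 : PySem.List.pyGetD r (((j : Nat) : Int) + 1) 0 = r.getD (j + 1) 0 := by
      rw [show ((j : Nat) : Int) + 1 = ((j + 1 : Nat) : Int) by push_cast; ring,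
        PySem.List.pyGetD_natCast]
    simp only [h1, h2, gt_iff_lt]
    by_cases hc : r.getD (j + 1) 0 < r.getD j 0
    · rw [if_pos hc, ih, pvPath, pvPathJ, if_pos hc, if_pos hc, List.append_assoc]
      rfl
    · rw [if_neg hc,
        show ((j : Nat) : Int) + 1 = ((j + 1 : Nat) : Int) by push_cast; ring, ih,
        pvPath, pvPathJ, if_neg hc, if_neg hc, List.append_assoc]
      rfl

theorem range_map_getD_drop {α : Type} (l : List α) (d : α) :
    (List.range (l.length - 1)).map (fun i => l.getD (i + 1) d) = l.drop 1 := by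
  apply List.ext_getElem
  · simp
  · intro i h1 h2
    simp only [List.getElem_map, List.getElem_range, List.getElem_drop]
    rw [List.getD_eq_getElem?_getD, List.getElem?_eq_getElem (by simp at h1 ⊢; omega)]
    simp [Nat.add_comm 1 i]

theorem traceB_pvPath (dpf : List (List Int)) :
    (pvTraceB dpf (dpf.length - 1)).1 = pvPath (dpf.drop 1) 0 := by
  have h := traceRows_path ((List.range (dpf.length - 1)).map (fun i => dpf.getD (i + 1) []))
    [] 0
  simp only [List.foldl_map, Nat.cast_zero, List.nil_append] at h
  rw [pvTraceB, h, range_map_getD_drop]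

-- lengths are preserved by the DP fold
theorem len_pvUpd (t : List (List Int)) (i j : Nat) : (pvUpd t i j).length = t.length := by
  simp [pvUpd]

theorem len_foldUpd (js : List Nat) (i : Nat) :
    ∀ t, (js.foldl (fun t j => pvUpd t i j) t).length = t.length := by
  induction js with
  | nil => intro t; rfl
  | cons j js ih => intro t; rw [List.foldl_cons, ih, len_pvUpd]

theorem len_pvFoldDown (k : Nat) :
    ∀ t : List (List Int), (pvFoldDown pvInn k t).length = t.length := by
  induction k with
  | zero => intro t; rfl
  | succ k ih =>
    intro t
    show (pvFoldDown pvInn k (pvInn t k)).length = t.length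
    rw [ih]; exact len_foldUpd _ _ t

-- the inner loop on the table, restricted to row i, is a fold of sets on that row
def pvRowUpd (r nr : List Int) (c : Nat) : List Int :=
  (List.range c).foldl (fun r j => r.set j (r.getD j 0 + max (nr.getD j 0) (nr.getD (j + 1) 0))) r

theorem foldUpd_row (i : Nat) (js : List Nat) :
    ∀ t, (js.foldl (fun t j => pvUpd t i j) t).getD i []
      = js.foldl
          (fun r j => r.set j (r.getD j 0 + max ((t.getD (i + 1) []).getD j 0)
            ((t.getD (i + 1) []).getD (j + 1) 0)))
          (t.getD i []) := by
  induction js with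
  | nil => intro t; rfl
  | cons j js ih =>
    intro t
    rw [List.foldl_cons, ih, List.foldl_cons]
    have hr1 : (pvUpd t i j).getD (i + 1) [] = t.getD (i + 1) [] :=
      row_pvUpd_ne _ _ _ _ (by omega)
    have hr2 : (pvUpd t i j).getD i []
        = (t.getD i []).set j ((t.getD i []).getD j 0 +
            max ((t.getD (i + 1) []).getD j 0) ((t.getD (i + 1) []).getD (j + 1) 0)) := by
      unfold pvUpd; exact getD_set_getD _ _ _ _
    rw [hr1, hr2]

theorem pvInn_self (t : List (List Int)) (i : Nat) :
    (pvInn t i).getD i [] = pvRowUpd (t.getD i []) (t.getD (i + 1) []) (i + 1) :=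
  foldUpd_row i (List.range (i + 1)) t

-- the finished table satisfies the row recurrence
theorem dp_final (k : Nat) :
    ∀ (t : List (List Int)) (i : Nat), i < k →
      (pvFoldDown pvInn k t).getD i []
        = pvRowUpd (t.getD i []) ((pvFoldDown pvInn k t).getD (i + 1) []) (i + 1) := by
  induction k with
  | zero => intro t i hi; omega
  | succ k ih =>
    intro t i hi
    show (pvFoldDown pvInn k (pvInn t k)).getD i []
      = pvRowUpd (t.getD i []) ((pvFoldDown pvInn k (pvInn t k)).getD (i + 1) []) (i + 1)
    by_cases hik : i < k
    · rw [ih (pvInn t k) i hik, row_pvInn_ne _ _ _ (by omega : i ≠ k)]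
    · have hik' : i = k := by omega
      subst hik'
      rw [row_pvFoldDown_ge i _ i (le_refl i), pvInn_self,
        row_pvFoldDown_ge i _ (i + 1) (by omega), row_pvInn_ne _ _ _ (by omega : i + 1 ≠ i)]

-- entrywise value of pvRowUpd
theorem pvRowUpd_len (r nr : List Int) (c : Nat) : (pvRowUpd r nr c).length = r.length := by
  induction c with
  | zero => rfl
  | succ c ih =>
    rw [pvRowUpd, List.range_succ]
    simp only [List.foldl_append, List.foldl_cons, List.foldl_nil]
    rw [← pvRowUpd, List.length_set, ih]

theorem pvRowUpd_ge (r nr : List Int) (c j : Nat) (h : c ≤ j) :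
    (pvRowUpd r nr c).getD j 0 = r.getD j 0 := by
  induction c with
  | zero => rfl
  | succ c ih =>
    rw [pvRowUpd, List.range_succ]
    simp only [List.foldl_append, List.foldl_cons, List.foldl_nil]
    rw [← pvRowUpd, getD_set_ne' _ _ _ _ _ (by omega), ih (by omega)]

theorem pvRowUpd_getD (r nr : List Int) (c j : Nat) (hj : j < c) (hr : j < r.length) :
    (pvRowUpd r nr c).getD j 0 = r.getD j 0 + max (nr.getD j 0) (nr.getD (j + 1) 0) := by
  induction c with
  | zero => omega
  | succ c ih =>
    rw [pvRowUpd, List.range_succ]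
    simp only [List.foldl_append, List.foldl_cons, List.foldl_nil]
    rw [← pvRowUpd]
    by_cases hjc : j = c
    · subst hjc
      rw [getD_set_self' _ _ _ _ (by rw [pvRowUpd_len]; omega), pvRowUpd_ge _ _ _ _ (le_refl j)]
    · rw [getD_set_ne' _ _ _ _ _ (by omega), ih (by omega)]

-- the DP recurrence on entries of the finished table, under the row-length precondition
theorem dp_row (trik : List (List Int)) (i j : Nat)
    (hP : ∀ r < trik.length, r + 1 ≤ (trik.getD r []).length)
    (hi : i < trik.length - 1) (hj : j ≤ i) :
    ((pvFoldDown pvInn (trik.length - 1) trik).getD i []).getD j 0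
      = (trik.getD i []).getD j 0 +
          max (((pvFoldDown pvInn (trik.length - 1) trik).getD (i + 1) []).getD j 0)
              (((pvFoldDown pvInn (trik.length - 1) trik).getD (i + 1) []).getD (j + 1) 0) := by
  rw [dp_final (trik.length - 1) trik i hi,
    pvRowUpd_getD _ _ _ _ (by omega) (by have := hP i (by omega); omega)]

-- abstract form of B's loop
def pvStepB (trik : List (List Int)) (b : List (Int × List String)) (i : Nat) :
    List (Int × List String) :=
  (List.range (i + 1)).map
    (fun j =>
      if (b.getD (j + 1) (0, [])).1 < (b.getD j (0, [])).1
      then ((trik.getD i []).getD j 0 + (b.getD j (0, [])).1, "levo" :: (b.getD j (0, [])).2)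
      else ((trik.getD i []).getD j 0 + (b.getD (j + 1) (0, [])).1,
            "desno" :: (b.getD (j + 1) (0, [])).2))

theorem getD_map_range {α : Type} (f : Nat → α) (c j : Nat) (d : α) (h : j < c) :
    ((List.range c).map f).getD j d = f j := by
  rw [List.getD_eq_getElem?_getD, List.getElem?_map, List.getElem?_range h]
  rfl

-- the invariant: the level-i list pairs each finished DP value with its downward optimal path
def pvGood (dpf : List (List Int)) (i : Nat) : List (Int × List String) :=
  (List.range (i + 1)).map
    (fun j => ((dpf.getD i []).getD j 0, pvPath (dpf.drop (i + 1)) j))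

theorem drop_cons_getD (l : List (List Int)) (k : Nat) (h : k < l.length) :
    l.drop k = l.getD k [] :: l.drop (k + 1) := by
  rw [List.drop_eq_getElem_cons h, List.getD_eq_getElem?_getD, List.getElem?_eq_getElem h]
  rfl

theorem stepB_good (trik : List (List Int)) (i : Nat)
    (hP : ∀ r < trik.length, r + 1 ≤ (trik.getD r []).length)
    (hi : i < trik.length - 1) :
    pvStepB trik (pvGood (pvFoldDown pvInn (trik.length - 1) trik) (i + 1)) i
      = pvGood (pvFoldDown pvInn (trik.length - 1) trik) i := by
  set dpf := pvFoldDown pvInn (trik.length - 1) trik with hdpf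
  have hlen : dpf.length = trik.length := len_pvFoldDown _ _
  refine List.map_congr_left ?_
  intro j hj
  rw [List.mem_range] at hj
  have hg : ∀ j', j' < i + 2 →
      (pvGood dpf (i + 1)).getD j' (0, [])
        = ((dpf.getD (i + 1) []).getD j' 0, pvPath (dpf.drop (i + 2)) j') := by
    intro j' hj'
    exact getD_map_range _ _ _ _ hj'
  rw [hg j (by omega), hg (j + 1) (by omega)]
  have hdrop : dpf.drop (i + 1) = dpf.getD (i + 1) [] :: dpf.drop (i + 2) :=
    drop_cons_getD dpf (i + 1) (by omega)
  have hv := dp_row trik i j hP hi (by omega)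
  rw [← hdpf] at hv
  by_cases hc : (dpf.getD (i + 1) []).getD (j + 1) 0 < (dpf.getD (i + 1) []).getD j 0
  · rw [if_pos hc, hv, hdrop, pvPath, if_pos hc,
      max_eq_left (le_of_lt hc)]
  · rw [if_neg hc, hv, hdrop, pvPath, if_neg hc,
      max_eq_right (by omega)]

theorem foldB_good (trik : List (List Int))
    (hP : ∀ r < trik.length, r + 1 ≤ (trik.getD r []).length) :
    ∀ k, k ≤ trik.length - 1 →
      pvFoldDown (pvStepB trik) k (pvGood (pvFoldDown pvInn (trik.length - 1) trik) k)
        = pvGood (pvFoldDown pvInn (trik.length - 1) trik) 0 := by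
  intro k
  induction k with
  | zero => intro _; rfl
  | succ k ih =>
    intro hk
    show pvFoldDown (pvStepB trik) k
        (pvStepB trik (pvGood (pvFoldDown pvInn (trik.length - 1) trik) (k + 1)) k) = _
    rw [stepB_good trik k hP (by omega), ih (by omega)]

-- B's port, normalized to the abstract fold, for n ≥ 2
theorem portB_norm (trik : List (List Int)) (hn : ¬ trik.length ≤ 1) :
    optimalna_pot_alt trik
      = (List.getD
          (pvFoldDown (pvStepB trik) (trik.length - 1)
            ((List.range trik.length).map
              (fun j => ((trik.getD (trik.length - 1) []).getD j 0, ([] : List String)))))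
          0 (0, [])).2 := by
  simp only [optimalna_pot_alt, if_neg hn]
  have hb0 : (PySem.List.pyRange 0 ((trik.length : Int)) 1).map
        (fun j => (PySem.List.pyGetD (PySem.List.pyGetD trik ((trik.length : Int) - 1) []) j 0,
                   ([] : List String)))
      = (List.range trik.length).map
          (fun j => ((trik.getD (trik.length - 1) []).getD j 0, ([] : List String))) := by
    rw [pvMapUp, show ((trik.length : Int)).toNat = trik.length by omega]
    refine List.map_congr_left ?_
    intro m _
    rw [show (trik.length : Int) - 1 = ((trik.length - 1 : Nat) : Int) by omega,
      PySem.List.pyGetD_natCast, PySem.List.pyGetD_natCast]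
  rw [hb0, pvFoldDesc]
  have hfold : pvFoldDown
      (fun (best : List (Int × List String)) (m : Nat) =>
        (PySem.List.pyRange 0 ((m : Int) + 1) 1).map
          (fun j =>
            if (PySem.List.pyGetD best j (0, [])).1 >
               (PySem.List.pyGetD best (j + 1) (0, [])).1
            then (PySem.List.pyGetD (PySem.List.pyGetD trik (m : Int) []) j 0 +
                    (PySem.List.pyGetD best j (0, [])).1,
                  "levo" :: (PySem.List.pyGetD best j (0, [])).2)
            else (PySem.List.pyGetD (PySem.List.pyGetD trik (m : Int) []) j 0 +
                    (PySem.List.pyGetD best (j + 1) (0, [])).1,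
                  "desno" :: (PySem.List.pyGetD best (j + 1) (0, [])).2)))
      (trik.length - 1)
      = pvFoldDown (pvStepB trik) (trik.length - 1) := by
    funext s
    refine pvFoldDown_congr _ _ ?_ _ _
    intro b m
    rw [show ((m : Nat) : Int) + 1 = ((m + 1 : Nat) : Int) by push_cast; ring, pvMapUp,
      show (((m + 1 : Nat) : Int)).toNat = m + 1 by omega, pvStepB]
    refine List.map_congr_left ?_
    intro j _
    simp only [← Nat.cast_add_one, PySem.List.pyGetD_natCast, gt_iff_lt]
  rw [hfold, show (0 : Int) = ((0 : Nat) : Int) by norm_num, PySem.List.pyGetD_natCast]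

-- A = B
theorem ports_eq (trik : List (List Int)) (hP : Pre_optimalna_pot trik) :
    optimalna_pot trik = optimalna_pot_alt trik := by
  by_cases hn : trik.length ≤ 1
  · -- both sides are the empty path
    have hA : optimalna_pot trik = [] := by
      rw [portA_traceB, show trik.length - 1 = 0 by omega]
      rfl
    rw [hA]
    simp only [optimalna_pot_alt, if_pos hn]
  · have hrows : ∀ r < trik.length, r + 1 ≤ (trik.getD r []).length := by
      rcases hP with h | h
      · omega
      · exact h
    have hdropnil : List.drop trik.length (pvFoldDown pvInn (trik.length - 1) trik) = [] :=
      List.drop_eq_nil_of_le (by rw [len_pvFoldDown])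
    -- base of B's fold is the invariant at the bottom row
    have hbase : (List.range trik.length).map
          (fun j => ((trik.getD (trik.length - 1) []).getD j 0, ([] : List String)))
        = pvGood (pvFoldDown pvInn (trik.length - 1) trik) (trik.length - 1) := by
      rw [pvGood, show trik.length - 1 + 1 = trik.length by omega]
      refine List.map_congr_left ?_
      intro j _
      rw [row_pvFoldDown_ge (trik.length - 1) trik (trik.length - 1) (le_refl _), hdropnil]
      rfl
    have hB : optimalna_pot_alt trik
        = pvPath ((pvFoldDown pvInn (trik.length - 1) trik).drop 1) 0 := by
      rw [portB_norm trik hn, hbase, foldB_good trik hrows (trik.length - 1) (le_refl _),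
        pvGood, getD_map_range _ _ _ _ (by omega : 0 < 0 + 1)]
    have hA : optimalna_pot trik
        = pvPath ((pvFoldDown pvInn (trik.length - 1) trik).drop 1) 0 := by
      have h := traceB_pvPath (pvFoldDown pvInn (trik.length - 1) trik)
      rw [len_pvFoldDown] at h
      rw [portA_traceB, h]
    rw [hA, hB]

-- ===== VERDICT (by name: the statement is the Claim_ definition above) =====
theorem optimalna_pot_spec : Claim_equal_optimalna_pot := by
  intro trikotnik _ hP
  unfold Spec_optimalna_pot
  exact ports_eq trikotnik hP
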